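-- pv_equiv track=rewrite | github.com/b-lavania/project-thema | RES/app.py | extract_role_blocks
-- ===== SOURCE A (Python) =====
-- def extract_role_blocks(master_context):
--     """Split master context into individual role blocks based on ### ROLE headers."""
--     blocks = {}
--     current_key = None
--     current_lines = []
--     for line in master_context.split("\n"):
--         if line.startswith("### ROLE"):
--             if current_key:
--                 blocks[current_key] = "\n".join(current_lines)
--             current_key = line.strip("# ").strip()
--             current_lines = [line]
--         elif current_key:
--             if line.startswith("### ") and not line.startswith("### ROLE"):
--                 current_lines.append(line)
--             elif line.startswith("## ") and current_key:
--                 blocks[current_key] = "\n".join(current_lines)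
--                 current_key = None
--                 current_lines = []
--             else:
--                 current_lines.append(line)
--     if current_key:
--         blocks[current_key] = "\n".join(current_lines)
--     return blocks
-- ===== SOURCE B (Python) =====
-- def _is_boundary(line):
--     # a block ends at the next '### ROLE' header or at a '## ' section line
--     return line.startswith("### ROLE") or line.startswith("## ")
--
--
-- def extract_role_blocks(master_context):
--     """Split master context into individual role blocks based on ### ROLE headers."""
--     lines = master_context.split("\n")
--     n = len(lines)
--     blocks = {}
--     pos = 0
--     while pos < n:
--         line = lines[pos]
--         pos += 1
--         if not line.startswith("### ROLE"):
--             continue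
--         body = [line]
--         while pos < n and not _is_boundary(lines[pos]):
--             body.append(lines[pos])
--             pos += 1
--         blocks[line.strip("# ").strip()] = "\n".join(body)
--     return blocks
-- ===== Notes on version B (the rewrite author's own statement) =====
-- stated objective: alternative
-- what changed: Replaces A's single-pass state machine (current_key/current_lines accumulators mutated per line) by a boundary-driven decomposition: scan to each '### ROLE' header, then span the block's body up to the next boundary line ('### ROLE' or '## ') and emit the whole block at once.
import Mathlib
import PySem

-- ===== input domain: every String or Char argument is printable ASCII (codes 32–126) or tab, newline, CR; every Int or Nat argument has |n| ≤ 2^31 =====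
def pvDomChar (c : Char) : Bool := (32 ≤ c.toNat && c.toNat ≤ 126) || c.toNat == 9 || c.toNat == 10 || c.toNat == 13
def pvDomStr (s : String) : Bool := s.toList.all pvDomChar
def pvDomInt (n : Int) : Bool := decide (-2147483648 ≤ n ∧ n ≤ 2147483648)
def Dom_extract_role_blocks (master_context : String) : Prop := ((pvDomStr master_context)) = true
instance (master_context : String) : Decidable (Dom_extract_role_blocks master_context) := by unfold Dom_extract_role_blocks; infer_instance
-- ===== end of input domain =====

-- B replaces A's one-pass state machine (current_key / current_lines accumulators) by a
-- boundary-driven scan: find each '### ROLE' header, then span the block's body lines up to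
-- the next boundary and emit the block at once (objective: alternative decomposition).

-- ===== PORT A =====
-- Python truthiness of `current_key` (None or a str): None and "" are falsy.
def pyTruthy : Option String → Bool
  | none => false
  | some s => decide (s ≠ "")

-- one iteration of A's `for line in …` loop; state = (blocks, current_key, current_lines)
def aStep (st : PySem.Dict String String × Option String × List String) (line : String) :
    PySem.Dict String String × Option String × List String :=
  match st with
  | (blocks, ck, cls) =>
    if PySem.Str.startswith line "### ROLE" then
      ((if pyTruthy ck then blocks.insert (ck.getD "") (PySem.Str.join "\n" cls) else blocks),
       some (PySem.Str.strip (PySem.Str.stripChars line "# ")), [line])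
    else if pyTruthy ck then
      (if PySem.Str.startswith line "### " && !(PySem.Str.startswith line "### ROLE") then
        (blocks, ck, cls ++ [line])
      else if PySem.Str.startswith line "## " && pyTruthy ck then
        (blocks.insert (ck.getD "") (PySem.Str.join "\n" cls), none, ([] : List String))
      else (blocks, ck, cls ++ [line]))
    else (blocks, ck, cls)

def extract_role_blocks (master_context : String) : List (String × String) :=
  -- split("\n") with a non-empty literal separator always succeeds; .getD [] is never taken
  let lines := (PySem.Str.split? master_context "\n").getD []
  let st := lines.foldl aStep ((PySem.Dict.empty : PySem.Dict String String), none, ([] : List String))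
  (if pyTruthy st.2.1 then st.1.insert (st.2.1.getD "") (PySem.Str.join "\n" st.2.2) else st.1).items

-- ===== PORT B =====
def bBoundary (line : String) : Bool :=
  PySem.Str.startswith line "### ROLE" || PySem.Str.startswith line "## "

-- the inner `while pos < n and not _is_boundary(lines[pos])` scan: (body lines, remaining lines)
def bScan : List String → List String × List String
  | [] => ([], [])
  | l :: rest =>
    if bBoundary l then ([], l :: rest)
    else ((bScan rest).1.cons l, (bScan rest).2)

lemma bScan_snd_length : ∀ ls : List String, (bScan ls).2.length ≤ ls.length := by
  intro ls
  induction ls with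
  | nil => simp [bScan]
  | cons l rest ih =>
    simp only [bScan]
    split
    · simp
    · simpa using Nat.le_succ_of_le ih

-- the outer `while pos < n` loop of B
def bLoop : List String → PySem.Dict String String → PySem.Dict String String
  | [], blocks => blocks
  | line :: rest, blocks =>
    if PySem.Str.startswith line "### ROLE" then
      bLoop (bScan rest).2
        (blocks.insert (PySem.Str.strip (PySem.Str.stripChars line "# "))
          (PySem.Str.join "\n" (line :: (bScan rest).1)))
    else bLoop rest blocks
  termination_by ls _ => ls.length
  decreasing_by
  · have := bScan_snd_length rest
    simp only [List.length_cons]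
    omega
  · simp

def extract_role_blocks_alt (master_context : String) : List (String × String) :=
  (bLoop ((PySem.Str.split? master_context "\n").getD []) (PySem.Dict.empty : PySem.Dict String String)).items

-- ===== PRECONDITION & SPEC =====
def Spec_extract_role_blocks (master_context : String) (out : List (String × String)) : Prop := out = extract_role_blocks_alt master_context
instance (master_context : String) (out : List (String × String)) : Decidable (Spec_extract_role_blocks master_context out) := by unfold Spec_extract_role_blocks; infer_instance

-- ===== CLAIM (what is proved, stated in full; the proofs are below) =====
def Claim_equal_extract_role_blocks : Prop := ∀ (master_context : String), Dom_extract_role_blocks master_context → Spec_extract_role_blocks master_context (extract_role_blocks master_context)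

-- ===== LEMMAS AND PROOFS =====

-- A's loop body applied over a whole list, and the final flush after the loop
def aRun (r : List String) (st : PySem.Dict String String × Option String × List String) :
    PySem.Dict String String × Option String × List String :=
  r.foldl aStep st

def aFinish (st : PySem.Dict String String × Option String × List String) : PySem.Dict String String :=
  if pyTruthy st.2.1 then st.1.insert (st.2.1.getD "") (PySem.Str.join "\n" st.2.2) else st.1

-- membership survives dropWhile when the predicate is false on the element
lemma mem_dropWhile_of {p : Char → Bool} {c : Char} (hc : p c = false) :
    ∀ cs : List Char, c ∈ cs → c ∈ cs.dropWhile p := by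
  intro cs
  induction cs with
  | nil => simp
  | cons a t ih =>
    intro hmem
    by_cases hpa : p a = true
    · rw [List.dropWhile_cons_of_pos hpa]
      rcases List.mem_cons.mp hmem with h | h
      · subst h; rw [hc] at hpa; exact absurd hpa (by simp)
      · exact ih h
    · rw [List.dropWhile_cons_of_neg hpa]
      exact hmem

-- the key derived from a '### ROLE…' header still contains the 'R', hence is non-empty
lemma key_ne_empty (l : String) (h : PySem.Str.startswith l "### ROLE" = true) :
    PySem.Str.strip (PySem.Str.stripChars l "# ") ≠ "" := by
  have hpre : ("### ROLE".toList) <+: l.toList :=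
    (PySem.Chars.startswith_iff l.toList "### ROLE".toList).mp (by simpa using h)
  have hR : ('R' : Char) ∈ l.toList := hpre.subset (by decide)
  intro heq
  have htl : (PySem.Str.strip (PySem.Str.stripChars l "# ")).toList = [] := by
    rw [heq]; decide
  have hmem : ('R' : Char) ∈ (PySem.Str.strip (PySem.Str.stripChars l "# ")).toList := by
    rw [PySem.Str.toList_strip, PySem.Str.toList_stripChars]
    unfold PySem.Chars.strip PySem.Chars.lstrip PySem.Chars.rstrip PySem.Chars.stripChars
    apply List.mem_reverse.mpr
    apply mem_dropWhile_of (by decide)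
    apply List.mem_reverse.mpr
    apply mem_dropWhile_of (by decide)
    apply List.mem_reverse.mpr
    apply mem_dropWhile_of (by decide)
    apply List.mem_reverse.mpr
    apply mem_dropWhile_of (by decide)
    exact hR
  rw [htl] at hmem
  exact absurd hmem (by simp)

-- two incompatible prefixes of the same string cannot both hold
lemma not_both_prefix {l : String} {p q : List Char}
    (hp : p <+: l.toList) (hq : q <+: l.toList) (h1 : ¬ p <+: q) (h2 : ¬ q <+: p) : False := by
  rcases List.prefix_or_prefix_of_prefix hp hq with h | h
  · exact h1 h
  · exact h2 h

lemma sw2_not_sw3 (l : String) (h : PySem.Str.startswith l "## " = true) :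
    PySem.Str.startswith l "### " = false := by
  by_contra hc
  have h2 : PySem.Str.startswith l "### " = true := by
    cases hb : PySem.Str.startswith l "### " <;> simp_all
  have hp := (PySem.Chars.startswith_iff l.toList "## ".toList).mp (by simpa using h)
  have hq := (PySem.Chars.startswith_iff l.toList "### ".toList).mp (by simpa using h2)
  exact not_both_prefix hp hq (by decide) (by decide)

-- OPEN-BLOCK lemma: from an open block (key k, accumulated lines acc), A scans exactly
-- the bScan body, flushes the block, and continues closed from bScan's remainder.
lemma aLoop_open (k : String) (hk : k ≠ "") :
    ∀ (r : List String) (b : PySem.Dict String String) (acc : List String),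
      aFinish (aRun r (b, some k, acc)) =
      aFinish (aRun (bScan r).2
        (b.insert k (PySem.Str.join "\n" (acc ++ (bScan r).1)), none, [])) := by
  intro r
  induction r with
  | nil =>
    intro b acc
    simp [aRun, aFinish, bScan, pyTruthy, hk]
  | cons l rest ih =>
    intro b acc
    cases hstart : PySem.Str.startswith l "### ROLE" with
    | true =>
      have hstart' := hstart; simp at hstart'
      have hb : bBoundary l = true := by simp [bBoundary, hstart']
      have hstep : aStep (b, some k, acc) l
          = (b.insert k (PySem.Str.join "\n" acc),
             some (PySem.Str.strip (PySem.Str.stripChars l "# ")), [l]) := by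
        simp [aStep, pyTruthy, hk, hstart']
      have hstep2 : aStep (b.insert k (PySem.Str.join "\n" acc), none, ([] : List String)) l
          = (b.insert k (PySem.Str.join "\n" acc),
             some (PySem.Str.strip (PySem.Str.stripChars l "# ")), [l]) := by
        simp [aStep, pyTruthy, hstart']
      simp only [bScan, hb, if_true, aRun, List.foldl_cons, hstep, hstep2, List.append_nil]
    | false =>
      cases h2 : PySem.Str.startswith l "## " with
      | true =>
        have h3 := sw2_not_sw3 l h2
        have hstart' := hstart; simp at hstart'
        have h2' := h2; simp at h2'
        have hb : bBoundary l = true := by simp [bBoundary, h2']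
        have h3' := h3; simp at h3'
        have hstep : aStep (b, some k, acc) l
            = (b.insert k (PySem.Str.join "\n" acc), none, ([] : List String)) := by
          simp [aStep, pyTruthy, hk, hstart', h2', h3']
        have hstep2 : aStep (b.insert k (PySem.Str.join "\n" acc), none, ([] : List String)) l
            = (b.insert k (PySem.Str.join "\n" acc), none, ([] : List String)) := by
          simp [aStep, pyTruthy, hstart']
        simp only [bScan, hb, if_true, aRun, List.foldl_cons, hstep, hstep2, List.append_nil]
      | false =>
        have hstart' := hstart; simp at hstart'
        have h2' := h2; simp at h2'
        have hb : bBoundary l = false := by simp [bBoundary, hstart', h2']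
        have hstep : aStep (b, some k, acc) l = (b, some k, acc ++ [l]) := by
          by_cases h4 : PySem.Str.startswith l "### " = true
          · have h4' := h4; simp at h4'
            simp [aStep, pyTruthy, hk, hstart', h4']
          · have h4' : PySem.Str.startswith l "### " = false := by
              cases hx : PySem.Str.startswith l "### " <;> simp_all
            simp at h4'
            simp [aStep, pyTruthy, hk, hstart', h2', h4']
        rw [show aRun (l :: rest) (b, some k, acc) = aRun rest (b, some k, acc ++ [l]) from by
          simp [aRun, hstep]]
        rw [ih b (acc ++ [l])]
        simp [bScan, hb]

-- CLOSED-STATE lemma: from the closed state, A's loop computes exactly bLoop.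
lemma aLoop_closed : ∀ (r : List String) (b : PySem.Dict String String),
    aFinish (aRun r (b, none, [])) = bLoop r b := by
  intro r b
  induction r, b using bLoop.induct with
  | case1 b => simp [aRun, aFinish, bLoop, pyTruthy]
  | case2 line rest b hstart ih =>
    have hk := key_ne_empty line hstart
    have hstart' := hstart; simp at hstart'
    have hstep : aStep (b, none, ([] : List String)) line
        = (b, some (PySem.Str.strip (PySem.Str.stripChars line "# ")), [line]) := by
      simp [aStep, pyTruthy, hstart']
    calc aFinish (aRun (line :: rest) (b, none, []))
        = aFinish (aRun rest (b, some (PySem.Str.strip (PySem.Str.stripChars line "# ")), [line])) := by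
          simp [aRun, hstep]
      _ = aFinish (aRun (bScan rest).2
            ((b.insert (PySem.Str.strip (PySem.Str.stripChars line "# "))
              (PySem.Str.join "\n" ([line] ++ (bScan rest).1))), none, [])) :=
          aLoop_open _ hk rest b [line]
      _ = bLoop (bScan rest).2
            (b.insert (PySem.Str.strip (PySem.Str.stripChars line "# "))
              (PySem.Str.join "\n" (line :: (bScan rest).1))) := by
          simpa using ih
      _ = bLoop (line :: rest) b := by rw [bLoop, if_pos hstart]
  | case3 line rest b hstart ih =>
    have hs : PySem.Str.startswith line "### ROLE" = false := by
      cases hx : PySem.Str.startswith line "### ROLE" <;> simp_all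
    have hs' := hs; simp at hs'
    have hstep : aStep (b, none, ([] : List String)) line = (b, none, ([] : List String)) := by
      simp [aStep, pyTruthy, hs']
    calc aFinish (aRun (line :: rest) (b, none, []))
        = aFinish (aRun rest (b, none, [])) := by simp [aRun, hstep]
      _ = bLoop rest b := ih
      _ = bLoop (line :: rest) b := by rw [bLoop, if_neg hstart]

-- ===== VERDICT (by name: the statement is the Claim_ definition above) =====
theorem extract_role_blocks_spec : Claim_equal_extract_role_blocks := by
  intro master_context _
  unfold Spec_extract_role_blocks extract_role_blocks extract_role_blocks_alt
  exact congrArg PySem.Dict.items (aLoop_closed _ _)
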